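-- pv_equiv track=rewrite | github.com/JacksonLind/CTF_Hunter | CTF-Tools-main/ctf_hunter/tests/test_rotation_brute.py | _grey_encode_text
-- ===== SOURCE A (Python) =====
-- def _grey_encode_text(t: str) -> str:
--     """Map each letter's position through n^(n>>1) Grey encoding mod 26."""
--     result = []
--     for c in t:
--         if c.isalpha():
--             pos = ord(c.lower()) - ord('a')
--             grey = pos ^ (pos >> 1)
--             encoded = chr(grey % 26 + ord('a'))
--             result.append(encoded.upper() if c.isupper() else encoded)
--         else:
--             result.append(c)
--     return ''.join(result)
-- ===== SOURCE B (Python) =====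
-- def _grey_encode_text(t: str) -> str:
--     """Map each letter's position through n^(n>>1) Grey encoding mod 26."""
--     table = {}
--     for p in range(26):
--         g = chr((p ^ (p >> 1)) % 26 + ord('a'))
--         table[chr(p + ord('a'))] = g
--         table[chr(p + ord('A'))] = g.upper()
--     return t.translate(str.maketrans(table))
-- ===== Notes on version B (the rewrite author's own statement) =====
-- stated objective: idiomatic
-- what changed: Replaces A's per-character isalpha/isupper branching and Grey arithmetic with a 52-entry translation table built once and applied via str.translate in a single C-level library pass.
import Mathlib
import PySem

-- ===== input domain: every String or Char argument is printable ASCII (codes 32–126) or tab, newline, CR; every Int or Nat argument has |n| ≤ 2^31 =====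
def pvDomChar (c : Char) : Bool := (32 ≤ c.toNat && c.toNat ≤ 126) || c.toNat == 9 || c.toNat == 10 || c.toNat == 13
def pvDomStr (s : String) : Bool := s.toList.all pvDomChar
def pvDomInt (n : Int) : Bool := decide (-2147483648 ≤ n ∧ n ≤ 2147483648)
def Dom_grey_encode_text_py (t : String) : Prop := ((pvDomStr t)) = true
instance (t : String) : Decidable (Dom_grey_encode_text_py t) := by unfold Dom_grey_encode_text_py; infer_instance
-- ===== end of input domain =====

-- B replaces A's per-character isalpha/isupper branching by a 52-entry translation
-- table built once and applied with a single translate pass (objective: idiomatic).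

set_option maxRecDepth 10000

-- ===== PORT A =====
-- one character of A's loop body: the appended string piece for character c
def greyStepA (c : Char) : Char :=
  if PySem.Chars.isalpha c then
    let pos : Int := ((PySem.Chars.lowerChar c).toNat : Int) - 97
    let grey : Int := PySem.Int.bxor pos (PySem.Int.floordiv pos 2)  -- pos >> 1 = pos // 2 exactly
    let encoded : Char := Char.ofNat (PySem.Int.mod grey 26 + 97).toNat  -- chr: mod 26 + 97 is a valid code point
    if PySem.Chars.isupper c then PySem.Chars.upperChar encoded else encoded
  else c

def grey_encode_text_py (t : String) : String :=
  -- result list built by append, joined at the end (each piece is one char)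
  String.mk (t.toList.foldl (fun (result : List Char) c => result ++ [greyStepA c]) [])

-- ===== PORT B =====
-- str.maketrans table over the 52 letters, built by the range(26) loop of Source B
def greyTableB : PySem.Dict Char Char :=
  (List.range 26).foldl (fun (d : PySem.Dict Char Char) p =>
      let g : Char := Char.ofNat ((p ^^^ (p >>> 1)) % 26 + 97)
      (d.insert (Char.ofNat (p + 97)) g).insert (Char.ofNat (p + 65)) (PySem.Chars.upperChar g))
    (PySem.Dict.mk [])

def grey_encode_text_py_alt (t : String) : String :=
  -- t.translate(table): each char replaced by its table entry, left unchanged if absent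
  String.mk (t.toList.map (fun c => (greyTableB.get? c).getD c))

-- ===== PRECONDITION & SPEC =====
def Spec_grey_encode_text_py (t : String) (out : String) : Prop := out = grey_encode_text_py_alt t
instance (t : String) (out : String) : Decidable (Spec_grey_encode_text_py t out) := by unfold Spec_grey_encode_text_py; infer_instance

-- ===== CLAIM (what is proved, stated in full; the proofs are below) =====
def Claim_equal_grey_encode_text_py : Prop := ∀ (t : String), Dom_grey_encode_text_py t → Spec_grey_encode_text_py t (grey_encode_text_py t)

-- ===== LEMMAS AND PROOFS =====

-- per-character agreement on every domain character (checked over the 127 ASCII codes)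
theorem greyStep_agree_code : ∀ n < 127, greyStepA (Char.ofNat n) = ((greyTableB.get? (Char.ofNat n)).getD (Char.ofNat n)) := by decide

theorem greyStep_agree (c : Char) (h : pvDomChar c = true) :
    greyStepA c = (greyTableB.get? c).getD c := by
  have hlt : c.toNat < 127 := by
    unfold pvDomChar at h
    simp only [Bool.or_eq_true, Bool.and_eq_true, decide_eq_true_eq, beq_iff_eq] at h
    omega
  have := greyStep_agree_code c.toNat hlt
  rwa [Char.ofNat_toNat] at this

theorem foldl_append_map {α β : Type} (f : α → β) (l : List α) (acc : List β) :
    l.foldl (fun r c => r ++ [f c]) acc = acc ++ l.map f := by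
  induction l generalizing acc with
  | nil => simp
  | cons x xs ih => simp [List.foldl, ih]

-- ===== VERDICT (by name: the statement is the Claim_ definition above) =====
theorem grey_encode_text_py_spec : Claim_equal_grey_encode_text_py := by
  intro t hd
  unfold Spec_grey_encode_text_py grey_encode_text_py grey_encode_text_py_alt
  rw [foldl_append_map]
  simp only [List.nil_append]
  congr 1
  apply List.map_congr_left
  intro c hc
  apply greyStep_agree
  have := hd
  unfold Dom_grey_encode_text_py pvDomStr at this
  exact List.all_eq_true.mp this c hc
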